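-- pv_equiv track=rewrite | github.com/9chu/parser_gen | parser_gen.py | _trim_right_until_new_line
-- ===== SOURCE A (Python) =====
-- def _trim_right_until_new_line(text):
--     for i in range(len(text) - 1, -1, -1):
--         ch = text[i:i+1]
--         if ch == '\n':
--             return text[0:i+1]  # save right \n
--         elif not ch.isspace():
--             break
--     return text
-- ===== SOURCE B (Python) =====
-- def _trim_right_until_new_line(text):
--     stripped = text.rstrip()
--     idx = text.rfind('\n')
--     if idx < len(stripped):
--         return text
--     return text[:idx + 1]
-- ===== Notes on version B (the rewrite author's own statement) =====
-- stated objective: simpler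
-- what changed: Replaces A's manual backward character-by-character loop (with its in-loop newline/whitespace branching) by two standard library calls, rstrip and rfind, plus a single index comparison deciding whether the last newline lies inside the trailing-whitespace region.
import Mathlib
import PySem

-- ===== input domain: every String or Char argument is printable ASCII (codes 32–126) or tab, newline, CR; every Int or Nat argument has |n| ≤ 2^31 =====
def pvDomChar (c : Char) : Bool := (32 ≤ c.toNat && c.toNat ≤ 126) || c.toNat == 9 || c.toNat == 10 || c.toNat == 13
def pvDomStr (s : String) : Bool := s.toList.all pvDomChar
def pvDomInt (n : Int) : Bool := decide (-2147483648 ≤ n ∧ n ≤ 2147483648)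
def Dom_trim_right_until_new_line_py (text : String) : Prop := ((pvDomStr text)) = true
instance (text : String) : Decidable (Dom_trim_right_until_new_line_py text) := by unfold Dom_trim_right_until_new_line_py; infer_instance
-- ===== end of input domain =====

-- B replaces A's manual backward character loop with two library calls (rstrip + rfind)
-- and one comparison (objective: simpler/idiomatic; same asymptotic cost).

-- ===== PORT A =====
-- A's backward for-loop over range(len(text)-1, -1, -1); fuel k means the loop is about
-- to process index i = k-1; ch = text[i:i+1] and text[0:i+1] are the slices below.
def trimA_go (cs : List Char) : Nat → List Char
  | 0 => cs
  | k+1 =>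
    let ch := PySem.Chars.slice cs (some (k : Int)) (some ((k : Int) + 1))
    if ch = ['\n'] then PySem.Chars.slice cs (some 0) (some ((k : Int) + 1))
    else if !(PySem.Chars.strIsspace ch) then cs
    else trimA_go cs k

def trim_right_until_new_line_py (text : String) : String :=
  String.ofList (trimA_go text.toList text.toList.length)

-- ===== PORT B =====
def trim_right_until_new_line_py_alt (text : String) : String :=
  let stripped := PySem.Chars.rstrip text.toList
  let idx := PySem.Chars.rfind text.toList ['\n']
  if idx < (stripped.length : Int) then text
  else String.ofList (PySem.Chars.slice text.toList none (some (idx + 1)))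

-- ===== PRECONDITION & SPEC =====
def Spec_trim_right_until_new_line_py (text : String) (out : String) : Prop := out = trim_right_until_new_line_py_alt text
instance (text : String) (out : String) : Decidable (Spec_trim_right_until_new_line_py text out) := by unfold Spec_trim_right_until_new_line_py; infer_instance

-- ===== CLAIM (what is proved, stated in full; the proofs are below) =====
def Claim_equal_trim_right_until_new_line_py : Prop := ∀ (text : String), Dom_trim_right_until_new_line_py text → Spec_trim_right_until_new_line_py text (trim_right_until_new_line_py text)

-- ===== LEMMAS AND PROOFS =====

lemma trimA_succ (cs : List Char) (k : Nat) :
    trimA_go cs (k+1) =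
      (if PySem.Chars.slice cs (some (k : Int)) (some ((k : Int) + 1)) = ['\n'] then
         PySem.Chars.slice cs (some 0) (some ((k : Int) + 1))
       else if !(PySem.Chars.strIsspace (PySem.Chars.slice cs (some (k : Int)) (some ((k : Int) + 1)))) then cs
       else trimA_go cs k) := by
  conv_lhs => unfold trimA_go

lemma clamp_nat (n k : Nat) (h : k ≤ n) : PySem.List.clampIdx n (k : Int) = k := by
  unfold PySem.List.clampIdx
  rw [if_neg (by omega)]
  simp [h]

lemma clamp_int (n : Nat) (i : Int) (h0 : 0 ≤ i) (h : i ≤ (n : Int)) :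
    PySem.List.clampIdx n i = i.toNat := by
  unfold PySem.List.clampIdx
  rw [if_neg (by omega)]
  have : i.toNat ≤ n := by omega
  simp [this]

-- text[i:i+1] at a valid index is the one-character list
lemma slice_one (cs : List Char) (k : Nat) (h : k < cs.length) :
    PySem.Chars.slice cs (some (k : Int)) (some ((k : Int) + 1)) = [cs[k]] := by
  have h1 : ((k : Int) + 1) = ((k+1 : Nat) : Int) := by push_cast; ring
  rw [h1]
  simp only [PySem.Chars.slice, PySem.List.slice, clamp_nat _ _ (le_of_lt h), clamp_nat _ _ h]
  have e : k + 1 - k = 1 := by omega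
  rw [e, List.take_one, List.head?_drop]
  simp [List.getElem?_eq_getElem h]

-- text[0:i] with 0 ≤ i ≤ len is take i
lemma slice_take (cs : List Char) (i : Int) (h0 : 0 ≤ i) (h : i ≤ (cs.length : Int)) :
    PySem.Chars.slice cs (some 0) (some i) = cs.take i.toNat := by
  simp only [PySem.Chars.slice, PySem.List.slice, clamp_int _ _ h0 h]
  simp [PySem.List.clampIdx]

-- text[:i] with 0 ≤ i ≤ len is take i
lemma slice_none_take (cs : List Char) (i : Int) (h0 : 0 ≤ i) (h : i ≤ (cs.length : Int)) :
    PySem.Chars.slice cs none (some i) = cs.take i.toNat := by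
  simp only [PySem.Chars.slice, PySem.List.slice, clamp_int _ _ h0 h]
  simp

lemma strIsspace_one (c : Char) : PySem.Chars.strIsspace [c] = PySem.Chars.isspace c := by
  simp [PySem.Chars.strIsspace]

lemma rfind_go_zero (s sub : List Char) :
    PySem.Chars.rfind.go s sub 0 = if sub.isPrefixOf s then 0 else -1 := by
  unfold PySem.Chars.rfind.go; rfl

lemma rfind_go_succ (s sub : List Char) (j : Nat) :
    PySem.Chars.rfind.go s sub (j+1) =
      if sub.isPrefixOf (s.drop (j+1)) then ((j+1 : Nat) : Int) else PySem.Chars.rfind.go s sub j := by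
  conv_lhs => unfold PySem.Chars.rfind.go

lemma prefix_nl (cs : List Char) (k : Nat) (hk : k < cs.length) :
    (['\n'].isPrefixOf (cs.drop k)) = (cs[k] == '\n') := by
  rw [List.drop_eq_getElem_cons hk]
  simp [List.isPrefixOf, eq_comm]

-- rfind.go never exceeds its fuel
lemma rfind_go_le (s sub : List Char) (k : Nat) : PySem.Chars.rfind.go s sub k ≤ (k : Int) := by
  induction k with
  | zero => rw [rfind_go_zero]; split <;> simp
  | succ j ih => rw [rfind_go_succ]; split <;> omega

-- an all-whitespace suffix starting at k bounds rstrip's length by k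
lemma rstrip_len_le (cs : List Char) (k : Nat)
    (h : ∀ j, (hj : j < cs.length) → k ≤ j → PySem.Chars.isspace cs[j] = true) :
    (PySem.Chars.rstrip cs).length ≤ k := by
  unfold PySem.Chars.rstrip
  rw [List.length_reverse]
  have hsplit : cs.reverse = (cs.drop k).reverse ++ (cs.take k).reverse := by
    rw [← List.reverse_append, List.take_append_drop]
  rw [hsplit, List.dropWhile_append]
  have hall : (cs.drop k).reverse.dropWhile PySem.Chars.isspace = [] := by
    rw [List.dropWhile_eq_nil_iff]
    intro x hx
    rw [List.mem_reverse] at hx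
    obtain ⟨i, hi, rfl⟩ := List.getElem_of_mem hx
    rw [List.getElem_drop]
    exact h _ (by rw [List.length_drop] at hi; omega) (by omega)
  rw [hall]
  simp only [List.isEmpty_nil, if_true]
  calc ((cs.take k).reverse.dropWhile PySem.Chars.isspace).length
      ≤ (cs.take k).reverse.length := List.length_dropWhile_le _ _
    _ ≤ k := by simp

-- a non-space character at k keeps index k inside rstrip
lemma lt_rstrip_len (cs : List Char) (k : Nat) (hk : k < cs.length)
    (h : PySem.Chars.isspace cs[k] = false) :
    k < (PySem.Chars.rstrip cs).length := by
  unfold PySem.Chars.rstrip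
  rw [List.length_reverse]
  have hsplit : cs.reverse = (cs.drop (k+1)).reverse ++ (cs[k] :: (cs.take k).reverse) := by
    have h1 : cs.take (k+1) = cs.take k ++ [cs[k]] := by
      rw [List.take_add_one, List.getElem?_eq_getElem hk]; rfl
    calc cs.reverse = (cs.take (k+1) ++ cs.drop (k+1)).reverse := by rw [List.take_append_drop]
      _ = (cs.drop (k+1)).reverse ++ (cs.take (k+1)).reverse := by rw [List.reverse_append]
      _ = (cs.drop (k+1)).reverse ++ (cs[k] :: (cs.take k).reverse) := by
            rw [h1, List.reverse_append]; rfl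
  rw [hsplit, List.dropWhile_append]
  split
  · rw [List.dropWhile_cons_of_neg (by simp [h])]
    simp only [List.length_cons, List.length_reverse, List.length_take]
    omega
  · simp only [List.length_append, List.length_cons, List.length_reverse, List.length_take]
    omega

lemma nl_space : PySem.Chars.isspace '\n' = true := by decide

-- main correspondence: A's loop with fuel k+1 against rfind.go at k
lemma main_corr (cs : List Char) (k : Nat) (hk : k < cs.length)
    (hscan : ∀ j, (hj : j < cs.length) → k < j → PySem.Chars.isspace cs[j] = true) :
    trimA_go cs (k+1) =
      (if PySem.Chars.rfind.go cs ['\n'] k < ((PySem.Chars.rstrip cs).length : Int) then cs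
       else cs.take ((PySem.Chars.rfind.go cs ['\n'] k).toNat + 1)) := by
  induction k with
  | zero =>
    have hpn : (['\n'].isPrefixOf cs) = (cs[0] == '\n') := by
      have := prefix_nl cs 0 hk
      simpa using this
    rw [trimA_succ, slice_one cs 0 hk]
    by_cases hnl : cs[0] = '\n'
    · have hst : (PySem.Chars.rstrip cs).length = 0 := by
        refine Nat.le_zero.mp (rstrip_len_le cs 0 ?_)
        intro j hj _
        rcases Nat.eq_zero_or_pos j with rfl | hpos
        · rw [hnl]; exact nl_space
        · exact hscan j hj hpos
      have hr : PySem.Chars.rfind.go cs ['\n'] 0 = 0 := by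
        rw [rfind_go_zero, hpn]; simp [hnl]
      rw [hr, if_pos (show [cs[0]] = ['\n'] by rw [hnl]),
          if_neg (show ¬((0:Int) < ((PySem.Chars.rstrip cs).length : Int)) by rw [hst]; omega),
          slice_take cs (((0:Nat):Int) + 1) (by omega) (by omega)]
      norm_num
    · have hr : PySem.Chars.rfind.go cs ['\n'] 0 = -1 := by
        rw [rfind_go_zero, hpn]; simp [hnl]
      rw [hr, if_neg (show ¬([cs[0]] = ['\n']) by simp [hnl]),
          if_pos (show (-1:Int) < ((PySem.Chars.rstrip cs).length : Int) by omega)]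
      split <;> rfl
  | succ j ih =>
    have hpn := prefix_nl cs (j+1) hk
    rw [trimA_succ, slice_one cs (j+1) hk, rfind_go_succ, hpn]
    by_cases hnl : cs[j+1] = '\n'
    · have hst : (PySem.Chars.rstrip cs).length ≤ j + 1 := by
        refine rstrip_len_le cs (j+1) ?_
        intro i hi hij
        rcases Nat.lt_or_ge (j+1) i with hgt | hle
        · exact hscan i hi hgt
        · have : i = j + 1 := by omega
          subst this; rw [hnl]; exact nl_space
      rw [if_pos (show (cs[j+1] == '\n') = true by simp [hnl]),
          if_pos (show [cs[j+1]] = ['\n'] by rw [hnl]),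
          if_neg (show ¬(((j+1:Nat):Int) < ((PySem.Chars.rstrip cs).length : Int)) by push_cast; omega),
          slice_take cs (((j+1:Nat):Int) + 1) (by positivity) (by push_cast; omega)]
      congr 1
    · rw [if_neg (show ¬((cs[j+1] == '\n') = true) by simp [hnl]),
          if_neg (show ¬([cs[j+1]] = ['\n']) by simp [hnl])]
      by_cases hsp : PySem.Chars.isspace cs[j+1] = true
      · rw [if_neg (show ¬((!PySem.Chars.strIsspace [cs[j+1]]) = true) by
            rw [strIsspace_one, hsp]; simp)]
        refine ih (by omega) ?_
        intro i hi hij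
        rcases Nat.lt_or_ge (j+1) i with hgt | hle
        · exact hscan i hi hgt
        · have : i = j + 1 := by omega
          subst this; exact hsp
      · have hsp' : PySem.Chars.isspace cs[j+1] = false := by simpa using hsp
        have hst : j + 1 < (PySem.Chars.rstrip cs).length := lt_rstrip_len cs (j+1) hk hsp'
        have hle := rfind_go_le cs ['\n'] j
        rw [if_pos (show (!PySem.Chars.strIsspace [cs[j+1]]) = true by
              rw [strIsspace_one, hsp']; simp),
            if_pos (show PySem.Chars.rfind.go cs ['\n'] j < ((PySem.Chars.rstrip cs).length : Int) by
              omega)]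

-- ===== VERDICT (by name: the statement is the Claim_ definition above) =====
theorem trim_right_until_new_line_py_spec : Claim_equal_trim_right_until_new_line_py := by
  intro text _
  unfold Spec_trim_right_until_new_line_py trim_right_until_new_line_py trim_right_until_new_line_py_alt
  set cs := text.toList with hcs
  unfold PySem.Chars.rfind
  rcases Nat.eq_zero_or_pos cs.length with h0 | hpos
  · have hnil : cs = [] := List.length_eq_zero_iff.mp h0
    rw [hnil]
    show String.ofList [] = text
    rw [← hnil, hcs, String.ofList_toList]
  · obtain ⟨m, hm⟩ : ∃ m, cs.length = m + 1 := ⟨cs.length - 1, by omega⟩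
    rw [hm, rfind_go_succ]
    rw [show cs.drop (m+1) = [] by rw [← hm]; simp,
        show (['\n'].isPrefixOf ([] : List Char)) = false from rfl]
    simp only [Bool.false_eq_true, if_false]
    rw [main_corr cs m (by omega) (by intro i hi him; omega)]
    have hle := rfind_go_le cs ['\n'] m
    by_cases hc : PySem.Chars.rfind.go cs ['\n'] m < ((PySem.Chars.rstrip cs).length : Int)
    · rw [if_pos hc, if_pos hc, hcs, String.ofList_toList]
    · rw [if_neg hc, if_neg hc]
      have hge : 0 ≤ PySem.Chars.rfind.go cs ['\n'] m := by
        have : (0:Int) ≤ ((PySem.Chars.rstrip cs).length : Int) := by positivity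
        omega
      have ht : ((PySem.Chars.rfind.go cs ['\n'] m) + 1).toNat
          = (PySem.Chars.rfind.go cs ['\n'] m).toNat + 1 := by omega
      rw [slice_none_take cs _ (by omega) (by omega), ht]
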